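-- pv_equiv track=rewrite | github.com/ipalongengi/spotify-fellowship | question1.py | sortByStrings
-- ===== SOURCE A (Python) =====
-- def sortByStrings(s, t):
--     # importing this built-in library is important to ensure that
--     # the dictionary remembers the order in which keys are entered
--     from collections import OrderedDict
--
--     hash_chars = OrderedDict()
--     for char in t:
--         hash_chars[char] = 0
--
--     for char in s:
--         if hash_chars.get(char) is not None:
--             hash_chars[char] += 1
--
--     output = ''
--     for char in hash_chars:
--         output += hash_chars[char]*char
--
--     return output
-- ===== SOURCE B (Python) =====
-- def sortByStrings(s, t):
--     # filter-then-stable-sort: keep the chars of s that occur in t and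
--     # stably sort them by the position of their first occurrence in t
--     order = {c: i for i, c in enumerate(dict.fromkeys(t))}
--     return ''.join(sorted((c for c in s if c in order), key=lambda c: order[c]))
-- ===== Notes on version B (the rewrite author's own statement) =====
-- stated objective: alternative
-- what changed: A builds an ordered count dictionary over t, tallies s into it and emits count*char per key; B instead filters s down to the characters present in t and stably sorts that filtered list by each character's first-occurrence position in t.
import Mathlib
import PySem

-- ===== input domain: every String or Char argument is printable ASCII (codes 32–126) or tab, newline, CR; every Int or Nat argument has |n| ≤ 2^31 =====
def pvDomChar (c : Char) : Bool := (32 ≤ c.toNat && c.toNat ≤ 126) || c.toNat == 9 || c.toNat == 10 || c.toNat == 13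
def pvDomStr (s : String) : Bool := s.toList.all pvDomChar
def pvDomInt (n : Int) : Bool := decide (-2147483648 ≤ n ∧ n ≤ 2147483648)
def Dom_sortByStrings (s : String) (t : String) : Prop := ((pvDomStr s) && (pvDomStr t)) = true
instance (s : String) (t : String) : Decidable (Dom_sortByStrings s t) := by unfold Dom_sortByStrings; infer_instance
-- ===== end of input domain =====

-- B replaces A's count-dictionary-and-emit strategy by filter-then-stable-sort (alternative algorithm, same exact output).

-- ===== PORT A =====
-- literal port of Source A: OrderedDict of counts over t, tally s, emit count*char per key
def sortByStrings (s : String) (t : String) : String :=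
  let d0 : PySem.Dict Char Int := t.toList.foldl (fun d c => d.insert c 0) PySem.Dict.empty
  let d1 : PySem.Dict Char Int :=
    s.toList.foldl (fun d c => if (d.get? c).isSome then d.modify c 0 (· + 1) else d) d0
  -- `output += hash_chars[char]*char`: the count is a non-negative int, so int*str is List.replicate count.toNat
  String.mk (d1.keys.foldl (fun acc c => acc ++ List.replicate (d1.getD c 0).toNat c) [])

-- ===== PORT B =====
-- literal port of Source B: order = {c: i for i, c in enumerate(dict.fromkeys(t))};
-- ''.join(sorted((c for c in s if c in order), key=lambda c: order[c]))
-- (`order[c]` is ported as get?.getD 0: every filtered c is a key of order, so it never raises)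
def sortByStrings_alt (s : String) (t : String) : String :=
  let order : PySem.Dict Char Int :=
    (PySem.List.enumerate (PySem.List.dedup t.toList)).foldl (fun d p => d.insert p.2 p.1)
      PySem.Dict.empty
  String.mk (PySem.List.sorted (s.toList.filter (fun c => order.contains c))
    (fun c => (order.get? c).getD 0) false)

-- ===== PRECONDITION & SPEC =====
def Spec_sortByStrings (s : String) (t : String) (out : String) : Prop := out = sortByStrings_alt s t
instance (s : String) (t : String) (out : String) : Decidable (Spec_sortByStrings s t out) := by unfold Spec_sortByStrings; infer_instance

-- ===== CLAIM (what is proved, stated in full; the proofs are below) =====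
def Claim_equal_sortByStrings : Prop := ∀ (s : String) (t : String), Dom_sortByStrings s t → Spec_sortByStrings s t (sortByStrings s t)

-- ===== LEMMAS AND PROOFS =====

-- A's tally loop: keys are unchanged and each present key's value grows by its count in s
theorem aloop_keys_getD (s : List Char) : ∀ (d : PySem.Dict Char Int),
    ((s.foldl (fun d c => if (d.get? c).isSome then d.modify c 0 (· + 1) else d) d).keys = d.keys) ∧
    (∀ v, (s.foldl (fun d c => if (d.get? c).isSome then d.modify c 0 (· + 1) else d) d).getD v 0
      = d.getD v 0 + (if d.contains v then (s.count v : Int) else 0)) := by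
  induction s with
  | nil => intro d; simp
  | cons c s ih =>
    intro d
    by_cases h : (d.get? c).isSome
    · have hc : d.contains c = true := by rw [PySem.Dict.contains_eq_isSome_get?]; exact h
      obtain ⟨hk, hg⟩ := ih (d.modify c 0 (· + 1))
      constructor
      · simp only [List.foldl_cons, h, if_true] at *
        rw [hk, PySem.Dict.keys_modify, PySem.Dict.keys_insert_of_contains _ _ hc]
      · intro v
        simp only [List.foldl_cons, h, if_true]
        rw [hg v, PySem.Dict.getD_modify, PySem.Dict.contains_modify]
        by_cases hv : v = c
        · subst hv
          simp [hc, List.count_cons_self]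
          ring
        · have hcv : ¬c = v := fun h => hv h.symm
          simp [hv, hcv]
    · have hc : d.contains c = false := by rw [PySem.Dict.contains_eq_isSome_get?]; simpa using h
      obtain ⟨hk, hg⟩ := ih d
      constructor
      · simpa [h] using hk
      · intro v
        simp only [List.foldl_cons, h, if_false, Bool.false_eq_true]
        rw [hg v]
        by_cases hv : v = c
        · subst hv; simp [hc]
        · have hcv : ¬c = v := fun h => hv h.symm
          simp [hcv]

-- the first loop of A fills every value with 0
theorem d0_getD (t : List Char) : ∀ (d : PySem.Dict Char Int), (∀ v, d.getD v 0 = 0) →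
    ∀ v, (t.foldl (fun d c => d.insert c 0) d).getD v 0 = 0 := by
  induction t with
  | nil => intro d h v; simpa using h v
  | cons c t ih =>
    intro d h v
    simp only [List.foldl_cons]
    exact ih _ (fun w => by rw [PySem.Dict.getD_insert]; split <;> simp [h]) v

-- B's order dict: get? returns the index of v in ds (shifted by the enumerate start)
theorem order_get (ds : List Char) : ∀ (j : Int) (d : PySem.Dict Char Int), ds.Nodup →
    ∀ v, ((PySem.List.enumerate ds j).foldl (fun d p => d.insert p.2 p.1) d).get? v
      = if v ∈ ds then some (j + (ds.idxOf v : Int)) else d.get? v := by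
  induction ds with
  | nil => intro j d _ v; simp [PySem.List.enumerate]
  | cons c ds ih =>
    intro j d hnd v
    simp only [PySem.List.enumerate, List.foldl_cons]
    rw [ih (j + 1) (d.insert c j) hnd.of_cons v]
    by_cases hv : v = c
    · subst hv
      have : v ∉ ds := (List.nodup_cons.mp hnd).1
      simp [this, PySem.Dict.get?_insert_self, List.idxOf_cons_self]
    · by_cases hm : v ∈ ds
      · have : ([c] ++ ds).idxOf v = 1 + ds.idxOf v := by
          rw [List.idxOf_append_of_notMem (by simpa using fun h => hv h)]; simp
        simp only [hm, if_true, List.mem_cons, hv, false_or, List.singleton_append] at *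
        rw [this]; push_cast; ring_nf
      · simp [hm, hv, PySem.Dict.get?_insert_of_ne _ _ hv]

-- pointwise congruence for flatMap over members
theorem flatMap_congr_mem {α β : Type} (ds : List α) (f g : α → List β)
    (h : ∀ c ∈ ds, f c = g c) : ds.flatMap f = ds.flatMap g := by
  induction ds with
  | nil => rfl
  | cons c ds ih =>
    simp only [List.flatMap_cons, h c (by simp), ih (fun x hx => h x (by simp [hx]))]

-- insertBy walks past a prefix it does not go before
theorem insertBy_skip (before : Char → Char → Bool) (x : Char) :
    ∀ (as bs : List Char), (∀ y ∈ as, before x y = false) →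
    PySem.List.insertBy before x (as ++ bs) = as ++ PySem.List.insertBy before x bs := by
  intro as
  induction as with
  | nil => intro bs _; rfl
  | cons a as ih =>
    intro bs h
    have ha : before x a = false := h a (by simp)
    simp only [List.cons_append, PySem.List.insertBy, ha, Bool.false_eq_true, if_false]
    rw [ih bs (fun y hy => h y (by simp [hy]))]

-- insertBy goes in front of a list it goes before everywhere
theorem insertBy_front (before : Char → Char → Bool) (x : Char) (bs : List Char)
    (h : ∀ y ∈ bs, before x y = true) :
    PySem.List.insertBy before x bs = x :: bs := by
  cases bs with
  | nil => rfl
  | cons b bs => simp [PySem.List.insertBy, h b (by simp)]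

-- groups of a char absent from ds gain nothing
theorem flatMap_no_x (x : Char) (g : Char → List Char) :
    ∀ (ds : List Char), (∀ c ∈ ds, x ≠ c) →
    ds.flatMap (fun c => g c ++ if x = c then [x] else []) = ds.flatMap g := by
  intro ds h
  apply flatMap_congr_mem
  intro c hc
  simp [h c hc]

-- inserting x into the concatenation of key-increasing groups appends it to its own group
theorem insertBy_groups (k : Char → Int) (g : Char → List Char)
    (hg : ∀ c, ∀ y ∈ g c, y = c) (x : Char) :
    ∀ (ds : List Char), ds.Pairwise (fun a b => k a < k b) → x ∈ ds →
    PySem.List.insertBy (fun a b => decide (k a < k b)) x (ds.flatMap g)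
      = ds.flatMap (fun c => g c ++ if x = c then [x] else []) := by
  intro ds
  induction ds with
  | nil => intro _ hx; cases hx
  | cons c ds ih =>
    intro hp hx
    have hc : ∀ d ∈ ds, k c < k d := fun d hd => List.rel_of_pairwise_cons hp hd
    have hnotc : ∀ d ∈ ds, d ≠ c := fun d hd he => by
      have := hc d hd; rw [he] at this; exact lt_irrefl _ this
    simp only [List.flatMap_cons]
    rcases List.mem_cons.mp hx with rfl | hx'
    · rw [insertBy_skip _ _ (g x) _ (fun y hy => by
        rw [hg x y hy]; simp)]
      rw [insertBy_front _ _ _ (fun y hy => by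
        obtain ⟨d, hd, hyd⟩ := List.mem_flatMap.mp hy
        rw [hg d y hyd]; simpa using hc d hd)]
      rw [flatMap_no_x x g ds (fun d hd he => hnotc d hd he.symm)]
      simp
    · have hxc : x ≠ c := fun he => hnotc x hx' he
      rw [insertBy_skip _ _ (g c) _ (fun y hy => by
        rw [hg c y hy]
        have : k c < k x := hc x hx'
        simp; omega)]
      rw [ih (List.Pairwise.of_cons hp) hx']
      simp [hxc]

-- stable-sorting the ds-filtered list by a key increasing along ds groups it in ds order
theorem sorted_filter_groups (ds : List Char) (k : Char → Int)
    (hp : ds.Pairwise (fun a b => k a < k b)) (l : List Char) :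
    PySem.List.sorted (l.filter (fun c => decide (c ∈ ds))) k false
      = ds.flatMap (fun c => l.filter (fun x => x == c)) := by
  induction l using List.reverseRecOn with
  | nil => simp [PySem.List.sorted_eq_foldl_insertBy]
  | append_singleton l x ih =>
    rw [List.filter_append]
    by_cases hx : x ∈ ds
    · have hfx : [x].filter (fun c => decide (c ∈ ds)) = [x] := by simp [hx]
      rw [hfx, PySem.List.sorted_eq_foldl_insertBy, List.foldl_append,
        List.foldl_cons, List.foldl_nil, ← PySem.List.sorted_eq_foldl_insertBy, ih]
      rw [insertBy_groups k _ (fun c y hy => by simpa using (List.mem_filter.mp hy).2) x ds hp hx]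
      apply flatMap_congr_mem
      intro c _
      rw [List.filter_append]
      by_cases he : x = c <;> simp [he]
    · have hfx : [x].filter (fun c => decide (c ∈ ds)) = [] := by simp [hx]
      rw [hfx, List.append_nil, ih]
      apply flatMap_congr_mem
      intro c hc
      rw [List.filter_append]
      have : x ≠ c := fun he => hx (he ▸ hc)
      simp [this]

-- ===== VERDICT (by name: the statement is the Claim_ definition above) =====
theorem sortByStrings_spec : Claim_equal_sortByStrings := by
  intro s t _
  unfold Spec_sortByStrings sortByStrings sortByStrings_alt
  set ds : List Char := PySem.List.dedup t.toList with hds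
  have hnd : ds.Nodup := PySem.Set.nodup_ofList t.toList
  -- the order dict of B
  have hget : ∀ v, ((PySem.List.enumerate ds 0).foldl (fun d p => d.insert p.2 p.1)
      PySem.Dict.empty).get? v = if v ∈ ds then some ((ds.idxOf v : Int)) else none := by
    intro v
    rw [order_get ds 0 PySem.Dict.empty hnd v]
    simp [PySem.Dict.get?_empty]
  -- B's filter predicate is membership in ds
  have hfilt : s.toList.filter (fun c => PySem.Dict.contains
        ((PySem.List.enumerate ds 0).foldl (fun d p => d.insert p.2 p.1) PySem.Dict.empty) c)
      = s.toList.filter (fun c => decide (c ∈ ds)) := by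
    apply List.filter_congr
    intro c _
    rw [PySem.Dict.contains_eq_isSome_get?, hget c]
    by_cases h : c ∈ ds <;> simp [h]
  -- B's key is strictly increasing along ds
  have hpair : ds.Pairwise (fun a b =>
      (((PySem.List.enumerate ds 0).foldl (fun d p => d.insert p.2 p.1)
        PySem.Dict.empty).get? a).getD 0
      < (((PySem.List.enumerate ds 0).foldl (fun d p => d.insert p.2 p.1)
        PySem.Dict.empty).get? b).getD 0) := by
    rw [List.pairwise_iff_getElem]
    intro i j hi hj hij
    rw [hget ds[i], hget ds[j]]
    simp only [List.getElem_mem, if_true]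
    have h1 : ds.idxOf ds[i] = i := List.Nodup.idxOf_getElem hnd i hi
    have h2 : ds.idxOf ds[j] = j := List.Nodup.idxOf_getElem hnd j hj
    simp [h1, h2]
    exact_mod_cast hij
  simp only [hfilt]
  rw [sorted_filter_groups ds _ hpair s.toList]
  -- now the A side
  have hd0keys : (t.toList.foldl (fun d c => d.insert c ((0 : Int)))
      (PySem.Dict.empty : PySem.Dict Char Int)).keys = ds := by
    exact PySem.Dict.keys_foldl_insert t.toList (fun _ _ => (0 : Int)) PySem.Dict.empty
  obtain ⟨hk, hg⟩ := aloop_keys_getD s.toList (t.toList.foldl (fun d c => d.insert c 0) PySem.Dict.empty)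
  rw [PySem.List.foldl_append_eq_flatMap, List.nil_append, hk, hd0keys]
  congr 1
  apply flatMap_congr_mem
  intro c hc
  have hcont : (t.toList.foldl (fun d c => d.insert c ((0 : Int)))
      (PySem.Dict.empty : PySem.Dict Char Int)).contains c = true := by
    rw [PySem.Dict.contains_iff_mem_keys, hd0keys]; exact hc
  rw [hg c, hcont, d0_getD t.toList PySem.Dict.empty (fun v => by simp) c, List.filter_beq]
  simp
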